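-- pv_equiv track=rewrite | github.com/Revi1337/BaekJoon-Coding-Test | 백준/Silver/1302. 베스트셀러/베스트셀러.py | solution
-- ===== SOURCE A (Python) =====
-- def solution(n, books):
--     books.sort()
--     book_dict = {}
--     for book in books:
--         book_dict[book] = book_dict.get(book, 0) + 1
--
--     max_count = -float('inf')
--     max_book = None
--     for book, count in book_dict.items():
--         if count > max_count:
--             max_count, max_book = count, book
--
--     return max_book
-- ===== SOURCE B (Python) =====
-- def solution(n, books):
--     books.sort()
--     cur_title = None
--     cur_count = 0
--     best_title = None
--     best_count = 0
--     for b in books: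
--         if b == cur_title:
--             cur_count += 1
--         else:
--             cur_title = b
--             cur_count = 1
--         if cur_count > best_count:
--             best_count = cur_count
--             best_title = b
--     return best_title
-- ===== Notes on version B (the rewrite author's own statement) =====
-- stated objective: simpler
-- what changed: Replaces the dict-building pass plus the separate max-scan over dict items by one fused run-length pass over the sorted list that keeps only four scalars (current title/count, best title/count); no dictionary is built.
-- outside the precondition, e.g. on solution(0, []): A returns None, B returns None
import Mathlib
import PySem

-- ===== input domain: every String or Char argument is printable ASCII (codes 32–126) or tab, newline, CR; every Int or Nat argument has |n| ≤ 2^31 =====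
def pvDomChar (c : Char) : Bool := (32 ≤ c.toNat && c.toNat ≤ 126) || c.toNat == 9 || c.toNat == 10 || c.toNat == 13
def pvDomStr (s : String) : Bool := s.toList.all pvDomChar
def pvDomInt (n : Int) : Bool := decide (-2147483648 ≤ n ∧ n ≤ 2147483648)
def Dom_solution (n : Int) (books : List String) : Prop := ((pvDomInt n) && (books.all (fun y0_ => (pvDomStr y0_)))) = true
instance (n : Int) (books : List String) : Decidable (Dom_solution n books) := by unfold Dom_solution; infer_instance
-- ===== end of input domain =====

-- B replaces A's dict-building pass plus separate max-scan by one fused run-length pass over the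
-- sorted list keeping four scalars (objective: simpler).  Both A and B sort `books` in place; the
-- equivalence proved here is about the RETURN value.

-- ===== PORT A =====
-- `count > max_count` where max_count starts as -float('inf'): the sentinel is ported as `none`
-- (every int is > -inf), `some m` afterwards — exact.
def solGtA (c : Int) (mc : Option Int) : Bool :=
  match mc with
  | none => true
  | some m => decide (m < c)

def solStepA (st : Option Int × Option String) (p : String × Int) : Option Int × Option String :=
  if solGtA p.2 st.1 then (some p.2, some p.1) else st

-- A returns `max_book`, which is None exactly when books = [] (outside Pre_); the port returns ""
-- there via `.getD ""`.
def solution (n : Int) (books : List String) : String :=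
  let s := PySem.List.sorted books (fun x => x) false
  let d := s.foldl (fun (d : PySem.Dict String Int) b => d.insert b (d.getD b 0 + 1)) PySem.Dict.empty
  let r := d.items.foldl solStepA ((none : Option Int), (none : Option String))
  r.2.getD ""

-- ===== PORT B =====
-- state = (cur_title, cur_count, best_title, best_count); None titles are `none`.
def solStepB (st : Option String × Int × Option String × Int) (b : String) :
    Option String × Int × Option String × Int :=
  let cur' := if some b == st.1 then st.1 else some b
  let cc' := if some b == st.1 then st.2.1 + 1 else 1
  if st.2.2.2 < cc' then (cur', cc', some b, cc') else (cur', cc', st.2.2.1, st.2.2.2)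

-- B returns best_title, None exactly when books = [] (outside Pre_); ported as "" via `.getD ""`.
def solution_alt (n : Int) (books : List String) : String :=
  let s := PySem.List.sorted books (fun x => x) false
  let r := s.foldl solStepB ((none : Option String), (0 : Int), (none : Option String), (0 : Int))
  r.2.2.1.getD ""

-- ===== PRECONDITION & SPEC =====
-- Pre_ excludes only the empty book list, on which A returns None, which is not a String.
def Pre_solution (n : Int) (books : List String) : Prop := books ≠ []
instance (n : Int) (books : List String) : Decidable (Pre_solution n books) := by
  unfold Pre_solution; infer_instance

def pvWitness_solution : Int × List String := (3, ["b", "a", "b"])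

def Spec_solution (n : Int) (books : List String) (out : String) : Prop := out = solution_alt n books
instance (n : Int) (books : List String) (out : String) : Decidable (Spec_solution n books out) := by
  unfold Spec_solution; infer_instance

-- ===== CLAIM (what is proved, stated in full; the proofs are below) =====
def Claim_equal_solution : Prop := ∀ (n : Int) (books : List String), Dom_solution n books → Pre_solution n books → Spec_solution n books (solution n books)

-- ===== LEMMAS AND PROOFS =====

-- set(run ++ rest) = head-of-run :: set(rest) when the run's element does not recur.
lemma sol_ofList_replicate {a : String} {k : Nat} (hk : 0 < k) :
    PySem.Set.ofList (List.replicate k a) = [a] := by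
  induction k with
  | zero => omega
  | succ k ih =>
    rw [List.replicate_succ, PySem.Set.ofList_cons]
    cases Nat.eq_zero_or_pos k with
    | inl h => subst h; rfl
    | inr h =>
      rw [ih h]
      have : PySem.Set.discard [a] a = [] := by
        apply List.eq_nil_iff_forall_not_mem.mpr
        intro y hy
        have h2 := (PySem.Set.mem_discard (s := [a]) (x := a) (y := y)).mp hy
        exact h2.2 (by simpa using h2.1)
      rw [this]

lemma sol_ofList_run {a : String} {k : Nat} {rest : List String} (hk : 0 < k)
    (hna : a ∉ rest) :
    PySem.Set.ofList (List.replicate k a ++ rest) = a :: PySem.Set.ofList rest := by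
  rw [PySem.Set.ofList_append, sol_ofList_replicate hk, PySem.Set.update_eq_append_filter]
  have : (PySem.Set.ofList rest).filter (fun y => !(PySem.Set.contains [a] y))
      = PySem.Set.ofList rest := by
    apply List.filter_eq_self.mpr
    intro y hy
    have hyr : y ∈ rest := (PySem.Set.mem_ofList (y := y) (xs := rest)).mp hy
    have hne : y ≠ a := by rintro rfl; exact hna hyr
    simp [hne]
  rw [this]
  rfl

-- items of the count dict of a run-decomposed list.
lemma sol_items_run {a : String} {k : Nat} {rest : List String} (hk : 0 < k)
    (hna : a ∉ rest) :
    (PySem.Dict.counter (List.replicate k a ++ rest)).items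
      = (a, (k : Int)) :: (PySem.Dict.counter rest).items := by
  rw [PySem.Dict.items_counter, PySem.Dict.items_counter, sol_ofList_run hk hna, List.map_cons]
  congr 1
  · have : (List.replicate k a ++ rest).count a = k := by
      rw [List.count_append, List.count_replicate_self, List.count_eq_zero_of_not_mem hna]
      omega
    rw [this]
  · apply List.map_congr_left
    intro x hx
    have hxr : x ∈ rest := (PySem.Set.mem_ofList (y := x) (xs := rest)).mp hx
    have hne : x ≠ a := by rintro rfl; exact hna hxr
    have : (List.replicate k a ++ rest).count x = rest.count x := by
      rw [List.count_append, List.count_replicate, if_neg (by simpa using (Ne.symm hne))]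
      omega
    rw [this]

-- B's fold over the tail of a run (current title already = a).
lemma sol_B_tail (a : String) (j : Nat) :
    ∀ (c bc : Int) (best : Option String), c ≤ bc →
    (List.replicate j a).foldl solStepB (some a, c, best, bc)
      = (some a, c + (j : Int), (if bc < c + (j : Int) then some a else best),
         (if bc < c + (j : Int) then c + (j : Int) else bc)) := by
  induction j with
  | zero =>
    intro c bc best hc
    rw [List.replicate_zero, List.foldl_nil]
    refine congrArg₂ Prod.mk rfl (congrArg₂ Prod.mk (by push_cast; omega)
      (congrArg₂ Prod.mk ?_ ?_))
    · rw [if_neg (by push_cast; omega)]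
    · rw [if_neg (by push_cast; omega)]
  | succ j ih =>
    intro c bc best hc
    rw [List.replicate_succ, List.foldl_cons]
    have hstep : solStepB (some a, c, best, bc) a
        = (some a, c + 1, (if bc < c + 1 then some a else best),
           (if bc < c + 1 then c + 1 else bc)) := by
      simp only [solStepB, beq_self_eq_true, if_true]
      split_ifs with h <;> rfl
    rw [hstep]
    by_cases h1 : bc < c + 1
    · rw [if_pos h1, if_pos h1, ih (c + 1) (c + 1) (some a) le_rfl]
      push_cast
      refine congrArg₂ Prod.mk rfl (congrArg₂ Prod.mk (by omega) (congrArg₂ Prod.mk ?_ ?_)) <;>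
        split_ifs <;> first | rfl | omega | (exfalso; omega)
    · rw [if_neg h1, if_neg h1, ih (c + 1) bc best (by omega)]
      push_cast
      refine congrArg₂ Prod.mk rfl (congrArg₂ Prod.mk (by omega) (congrArg₂ Prod.mk ?_ ?_)) <;>
        split_ifs <;> first | rfl | omega | (exfalso; omega)
  
-- B's fold over one whole run, entered with a different (or no) current title.
lemma sol_B_run (a : String) (k : Nat) (hk : 0 < k) (cur : Option String) (cc bc : Int)
    (best : Option String) (hcur : cur ≠ some a) (hbc : 0 ≤ bc) :
    (List.replicate k a).foldl solStepB (cur, cc, best, bc)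
      = (some a, (k : Int), (if bc < (k : Int) then some a else best),
         (if bc < (k : Int) then (k : Int) else bc)) := by
  obtain ⟨j, rfl⟩ : ∃ j, k = j + 1 := ⟨k - 1, by omega⟩
  rw [List.replicate_succ, List.foldl_cons]
  have hne : (some a == cur) = false := by
    rw [beq_eq_false_iff_ne]
    exact fun h => hcur h.symm
  have hstep : solStepB (cur, cc, best, bc) a
      = (some a, 1, (if bc < 1 then some a else best), (if bc < 1 then 1 else bc)) := by
    simp only [solStepB, hne, Bool.false_eq_true, if_false]
    split_ifs with h <;> rfl
  rw [hstep]
  by_cases h1 : bc < 1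
  · rw [if_pos h1, if_pos h1, sol_B_tail a j 1 1 (some a) le_rfl]
    push_cast
    refine congrArg₂ Prod.mk rfl (congrArg₂ Prod.mk (by omega) (congrArg₂ Prod.mk ?_ ?_)) <;>
      split_ifs <;> first | rfl | omega | (exfalso; omega)
  · rw [if_neg h1, if_neg h1, sol_B_tail a j 1 bc best (by omega)]
    push_cast
    refine congrArg₂ Prod.mk rfl (congrArg₂ Prod.mk (by omega) (congrArg₂ Prod.mk ?_ ?_)) <;>
      split_ifs <;> first | rfl | omega | (exfalso; omega)

-- a sorted nonempty list splits into the run of its head followed by strictly larger elements.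
lemma sol_run_split (b : String) (t : List String) (hs : (b :: t).Pairwise (· ≤ ·)) :
    ∃ (j : Nat) (rest : List String), b :: t = List.replicate (j + 1) b ++ rest ∧
      rest.Pairwise (· ≤ ·) ∧ ∀ x ∈ rest, b < x := by
  set s := b :: t with hsdef
  set p : String → Bool := fun x => x == b with hp
  have htake : s.takeWhile p = List.replicate (s.takeWhile p).length b := by
    apply (List.eq_replicate_iff).mpr
    refine ⟨rfl, ?_⟩
    intro x hx
    have := List.mem_takeWhile_imp hx
    simpa [hp] using this
  have hlen : 0 < (s.takeWhile p).length := by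
    rw [hsdef]
    simp [hp]
  refine ⟨(s.takeWhile p).length - 1, s.dropWhile p, ?_, ?_, ?_⟩
  · rw [Nat.sub_add_cancel (by omega : 1 ≤ (s.takeWhile p).length), ← htake]
    exact (List.takeWhile_append_dropWhile (p := p) (l := s)).symm
  · exact hs.sublist (List.dropWhile_sublist p)
  · intro x hx
    have hble : ∀ y ∈ s.dropWhile p, b ≤ y := by
      intro y hy
      have hys : y ∈ s := (List.dropWhile_sublist p).subset hy
      rcases (List.mem_cons.mp hys) with h | h
      · exact le_of_eq h.symm
      · exact (List.pairwise_cons.mp hs).1 y h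
    cases hdrop : s.dropWhile p with
    | nil => rw [hdrop] at hx; cases hx
    | cons r0 r' =>
      have hr0 : ¬ p r0 := by
        have := List.head?_dropWhile_not p s
        rw [hdrop] at this
        simpa using this
      have hbr0 : b < r0 := by
        have : b ≤ r0 := hble r0 (by rw [hdrop]; exact List.mem_cons_self)
        have hne : r0 ≠ b := by simpa [hp] using hr0
        exact lt_of_le_of_ne this (Ne.symm hne)
      rw [hdrop] at hx
      rcases List.mem_cons.mp hx with h | h
      · exact h ▸ hbr0
      · have hrest : (s.dropWhile p).Pairwise (· ≤ ·) := hs.sublist (List.dropWhile_sublist p)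
        rw [hdrop] at hrest
        exact lt_of_lt_of_le hbr0 ((List.pairwise_cons.mp hrest).1 x h)

-- the crux: A's scan of the count-dict items and B's run-length scan keep the same best title.
lemma sol_main : ∀ (N : Nat) (s : List String), s.length ≤ N → s.Pairwise (· ≤ ·) →
    ∀ (mc : Option Int) (mb cur : Option String) (cc bc : Int),
      (∀ x ∈ s, cur ≠ some x) → 0 ≤ bc →
      (∀ k : Int, 1 ≤ k → solGtA k mc = decide (bc < k)) →
      ((PySem.Dict.counter s).items.foldl solStepA (mc, mb)).2
        = (s.foldl solStepB (cur, cc, mb, bc)).2.2.1 := by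
  intro N
  induction N with
  | zero =>
    intro s hlen _ mc mb cur cc bc _ _ _
    have : s = [] := List.length_eq_zero_iff.mp (by omega)
    subst this
    rfl
  | succ N ih =>
    intro s hlen hs mc mb cur cc bc hcur hbc hgt
    cases s with
    | nil => rfl
    | cons b t =>
      obtain ⟨j, rest, hsplit, hrest, hgtall⟩ := sol_run_split b t hs
      have hna : b ∉ rest := fun h => lt_irrefl b (hgtall b h)
      have hrlen : rest.length ≤ N := by
        have h2 := congrArg List.length hsplit
        simp [List.length_replicate, List.length_cons] at h2 hlen
        omega
      rw [hsplit, sol_items_run (by omega) hna, List.foldl_cons, List.foldl_append,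
        sol_B_run b (j + 1) (by omega) cur cc bc mb
          (by intro h; exact hcur b List.mem_cons_self h) hbc]
      have hk1 : (1 : Int) ≤ ((j + 1 : Nat) : Int) := by push_cast; omega
      have hstepA : solStepA (mc, mb) (b, ((j + 1 : Nat) : Int))
          = if bc < ((j + 1 : Nat) : Int) then (some ((j + 1 : Nat) : Int), some b) else (mc, mb) := by
        have hgt' := hgt ((j : Int) + 1) (by omega)
        simp [solStepA, hgt']
      rw [hstepA]
      by_cases h1 : bc < ((j + 1 : Nat) : Int)
      · rw [if_pos h1, if_pos h1, if_pos h1]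
        exact ih rest hrlen hrest (some ((j + 1 : Nat) : Int)) (some b) (some b) _ _
          (by intro x hx h
              have hbx := Option.some.inj h
              subst hbx
              exact lt_irrefl b (hgtall _ hx))
          (by omega)
          (by intro k hk; rfl)
      · rw [if_neg h1, if_neg h1, if_neg h1]
        exact ih rest hrlen hrest mc mb (some b) _ _
          (by intro x hx h
              have hbx := Option.some.inj h
              subst hbx
              exact lt_irrefl b (hgtall _ hx))
          hbc hgt

-- ===== VERDICT (by name: the statement is the Claim_ definition above) =====
theorem solution_spec : Claim_equal_solution := by
  intro n books _ _
  simp only [Spec_solution, solution, solution_alt]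
  rw [PySem.Dict.foldl_insert_getD_add_one_eq_counter]
  have hpw : (PySem.List.sorted books (fun x => x) false).Pairwise (· ≤ ·) :=
    PySem.List.sorted_pairwise books (fun x => x)
  have := sol_main (PySem.List.sorted books (fun x => x) false).length
    (PySem.List.sorted books (fun x => x) false) le_rfl hpw
    none none none 0 0 (by intro x _ h; simp at h) le_rfl
    (by intro k hk; simp [solGtA]; omega)
  rw [this]
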